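-- pv_equiv track=rewrite | github.com/ChinomnsoC/data-structure-algorithms | depth_first_search/tallest_tree_root.py | tallest_tree_root
-- ===== SOURCE A (Python) =====
-- def tallest_tree_root(forest: dict) -> int:
--     if not forest:
--         return 0
--
--     # get the childrend and parents ina set
--     # build adj list
--     # dfs recursion
--     # forest is {child: parent}
--     children = set(forest.keys())
--     all_nodes = set(forest.keys()) | set(forest.values())
--     roots = all_nodes - children
--
--     adj_list = {}
--
--     for child, parent in forest.items():
--         if parent not in adj_list:
--             adj_list[parent] = []
--         adj_list[parent].append(child)
--
--     def dfs_height(node, adj_list):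
--         if node not in adj_list:
--             return 1
--         return 1 + max(dfs_height(child, adj_list) for child in adj_list[node])
--
--     roots_dictionary = {}
--     for root in roots:
--         height = dfs_height(root, adj_list)
--         roots_dictionary[root] = height
--
--     max_height = max(roots_dictionary.values())
--
--     ties = []
--     for root, height in roots_dictionary.items():
--         if height == max_height:
--             ties.append(root)
--
--     return min(ties)
-- ===== SOURCE B (Python) =====
-- def tallest_tree_root(forest: dict) -> int:
--     if not forest:
--         return 0
--     heights = {}
--     for node in set(forest.keys()) | set(forest.values()):
--         depth = 0
--         cur = node
--         while cur in forest:
--             cur = forest[cur]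
--             depth += 1
--         heights[cur] = max(heights.get(cur, 0), depth + 1)
--     best = max(heights.values())
--     return min(r for r, h in heights.items() if h == best)
-- ===== Notes on version B (the rewrite author's own statement) =====
-- stated objective: simpler
-- what changed: B drops A's child-adjacency dict and recursive downward DFS entirely: for each node it walks the parent chain upward to its root, counting depth, and keeps a running max height per root, then returns the smallest root with maximal height.
-- outside the precondition, e.g. on tallest_tree_root({1: 2, 2: 1, 3: 4}): A returns 4, B does not finish within the time limit
import Mathlib
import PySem

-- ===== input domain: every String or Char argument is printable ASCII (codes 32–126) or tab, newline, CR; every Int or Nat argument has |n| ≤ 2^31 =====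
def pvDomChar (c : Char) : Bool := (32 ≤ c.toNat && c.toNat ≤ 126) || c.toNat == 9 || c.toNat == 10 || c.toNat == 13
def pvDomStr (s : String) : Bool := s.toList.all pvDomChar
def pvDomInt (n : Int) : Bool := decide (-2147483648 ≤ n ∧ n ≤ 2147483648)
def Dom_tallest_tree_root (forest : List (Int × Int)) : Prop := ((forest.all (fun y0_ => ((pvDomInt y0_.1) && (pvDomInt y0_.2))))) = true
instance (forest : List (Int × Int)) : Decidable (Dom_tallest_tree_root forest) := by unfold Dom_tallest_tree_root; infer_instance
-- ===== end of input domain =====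

-- B replaces A's child-adjacency list and downward DFS recursion by one upward
-- parent-chain walk per node with a running max per root (objective: alternative).

-- ===== PORT A =====
-- dfs_height(node, adj_list); the fuel argument makes the recursion structural (Python
-- recurses unboundedly on cyclic input, which Pre_ excludes; with fuel forest.length + 1
-- the fuel-0 branch is never reached on Pre_).
def pvDfsHeight (adj : PySem.Dict Int (List Int)) : Nat → Int → Int
  | 0, _ => 0
  | fuel+1, node =>
    match adj.get? node with
    | none => 1
    | some cs => 1 + (PySem.List.max? (cs.map (pvDfsHeight adj fuel)) (fun x => x)).getD 0

def tallest_tree_root (forest : List (Int × Int)) : Int :=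
  if forest = [] then 0
  else
    let children : PySem.Set Int := PySem.Set.ofList (forest.map (·.1))
    let allNodes : PySem.Set Int :=
      PySem.Set.union (PySem.Set.ofList (forest.map (·.1))) (PySem.Set.ofList (forest.map (·.2)))
    let roots : PySem.Set Int := PySem.Set.diff allNodes children
    let adj : PySem.Dict Int (List Int) :=
      forest.foldl (fun d cp =>
        (if d.contains cp.2 then d else d.insert cp.2 ([] : List Int)).modify cp.2 []
          (fun l => l ++ [cp.1])) PySem.Dict.empty
    let rootsDict : PySem.Dict Int Int :=
      roots.foldl (fun d r => d.insert r (pvDfsHeight adj (forest.length + 1) r)) PySem.Dict.empty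
    -- max() / min() of lists that are nonempty on Pre_
    let maxHeight : Int := (PySem.List.max? rootsDict.values (fun x => x)).getD 0
    let ties : List Int :=
      rootsDict.items.foldl (fun acc p => if p.2 = maxHeight then acc ++ [p.1] else acc) []
    (PySem.List.min? ties (fun x => x)).getD 0

-- ===== PORT B =====
-- while cur in forest: cur = forest[cur]; depth += 1 — fuel forest.length bounds the
-- walk; on Pre_ (acyclic parent links) every chain leaves the key set within that many steps.
def pvClimb (d : PySem.Dict Int Int) : Nat → Int → Nat → (Int × Nat)
  | 0, cur, depth => (cur, depth)
  | fuel+1, cur, depth =>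
    match d.get? cur with
    | some p => pvClimb d fuel p (depth + 1)
    | none => (cur, depth)

def tallest_tree_root_alt (forest : List (Int × Int)) : Int :=
  if forest = [] then 0
  else
    let d : PySem.Dict Int Int := PySem.Dict.mk forest
    let nodes : PySem.Set Int :=
      PySem.Set.union (PySem.Set.ofList (forest.map (·.1))) (PySem.Set.ofList (forest.map (·.2)))
    let heights : PySem.Dict Int Int :=
      nodes.foldl (fun h n =>
        let rd := pvClimb d forest.length n 0
        h.insert rd.1 (max (h.getD rd.1 0) ((rd.2 : Int) + 1))) PySem.Dict.empty
    let best : Int := (PySem.List.max? heights.values (fun x => x)).getD 0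
    (PySem.List.min?
      (heights.items.filterMap (fun p => if p.2 = best then some p.1 else none))
      (fun x => x)).getD 0

-- ===== PRECONDITION & SPEC =====
-- first-match association lookup (= dict lookup; keys are unique on Pre_)
def pvLook (forest : List (Int × Int)) (n : Int) : Option Int :=
  (forest.find? (fun p => p.1 == n)).map (·.2)

-- one parent step; fixes non-keys
def pvStep (forest : List (Int × Int)) (n : Int) : Int := (pvLook forest n).getD n

-- Pre_ excludes (a) lists with duplicate child keys, where the association-list reading of
-- a Python dict is ambiguous, and (b) cyclic parent links, i.e. inputs that are not a
-- forest: there A either raises (RecursionError / ValueError on an all-cycle input) or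
-- accidentally ignores the cyclic component, while B's upward walk does not terminate.
-- Acyclicity is stated as: from every key, forest.length parent steps leave the key set.
def Pre_tallest_tree_root (forest : List (Int × Int)) : Prop :=
  (forest.map (·.1)).Nodup ∧
  ∀ k ∈ forest.map (·.1), (pvStep forest)^[forest.length] k ∉ forest.map (·.1)

instance (forest : List (Int × Int)) : Decidable (Pre_tallest_tree_root forest) := by
  unfold Pre_tallest_tree_root; infer_instance

def pvWitness_tallest_tree_root : (List (Int × Int)) := [(2, 1), (3, 1), (4, 3), (6, 5)]

def Spec_tallest_tree_root (forest : List (Int × Int)) (out : Int) : Prop := out = tallest_tree_root_alt forest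
instance (forest : List (Int × Int)) (out : Int) : Decidable (Spec_tallest_tree_root forest out) := by unfold Spec_tallest_tree_root; infer_instance

-- ===== CLAIM (what is proved, stated in full; the proofs are below) =====
def Claim_equal_tallest_tree_root : Prop := ∀ (forest : List (Int × Int)), Dom_tallest_tree_root forest → Pre_tallest_tree_root forest → Spec_tallest_tree_root forest (tallest_tree_root forest)

-- ===== LEMMAS AND PROOFS =====

-- proof-side abbreviations
def pvDm (forest : List (Int × Int)) : PySem.Dict Int Int := PySem.Dict.mk forest
def pvKeys (forest : List (Int × Int)) : List Int := forest.map (·.1)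
def pvIter (forest : List (Int × Int)) : Nat → Int → Option Int
  | 0, n => some n
  | k+1, n => ((pvDm forest).get? n).bind (pvIter forest k)
def pvRt (forest : List (Int × Int)) (n : Int) : Int := (pvClimb (pvDm forest) forest.length n 0).1
def pvDp (forest : List (Int × Int)) (n : Int) : Nat := (pvClimb (pvDm forest) forest.length n 0).2

lemma look_eq (forest : List (Int × Int)) (n : Int) : (pvDm forest).get? n = pvLook forest n := by
  induction forest with
  | nil => rfl
  | cons p t ih =>
    show (PySem.Dict.mk ((p.1, p.2) :: t)).get? n = _
    rw [PySem.Dict.get?_mk_cons]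
    simp only [pvLook, List.find?_cons]
    by_cases h : p.1 == n
    · simp [h]
    · have h' : (p.1 == n) = false := by simpa using h
      rw [if_neg h]
      simp only [h']
      exact ih

lemma get?_none_iff (forest : List (Int × Int)) (n : Int) :
    (pvDm forest).get? n = none ↔ n ∉ pvKeys forest := by
  rw [look_eq]
  simp only [pvLook, Option.map_eq_none_iff, List.find?_eq_none, pvKeys, List.mem_map]
  constructor
  · rintro h ⟨a, ha, hq⟩; exact absurd hq (by simpa using h _ ha)
  · rintro h p hp
    simp only [beq_iff_eq]
    intro hq; exact h ⟨p, hp, hq⟩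

lemma climb_shift (d : PySem.Dict Int Int) : ∀ (fuel : Nat) (n : Int) (dep : Nat),
    pvClimb d fuel n dep = ((pvClimb d fuel n 0).1, dep + (pvClimb d fuel n 0).2) := by
  intro fuel
  induction fuel with
  | zero => intro n dep; simp [pvClimb]
  | succ f ih =>
    intro n dep
    simp only [pvClimb]
    cases h : d.get? n with
    | none => simp
    | some p => simp only []; rw [ih p (dep+1), ih p 1]; simp; omega

lemma iter_cons (f : List (Int × Int)) (k : Nat) (n p : Int) (h : (pvDm f).get? n = some p) :
    pvIter f (k+1) n = pvIter f k p := by simp [pvIter, h]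

lemma iter_none_succ (f : List (Int × Int)) (k : Nat) (n : Int) (h : (pvDm f).get? n = none) :
    pvIter f (k+1) n = none := by simp [pvIter, h]

lemma iter_snoc (f : List (Int × Int)) : ∀ (k : Nat) (n m p : Int),
    pvIter f k n = some m → (pvDm f).get? m = some p → pvIter f (k+1) n = some p := by
  intro k
  induction k with
  | zero => intro n m p h1 h2; simp only [pvIter] at h1; cases h1
            rw [iter_cons f 0 n p h2]; rfl
  | succ j ih =>
    intro n m p h1 h2
    cases hg : (pvDm f).get? n with
    | none => rw [iter_none_succ f j n hg] at h1; cases h1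
    | some q =>
      rw [iter_cons f j n q hg] at h1
      rw [iter_cons f (j+1) n q hg]
      exact ih q m p h1 h2

lemma iter_last (f : List (Int × Int)) : ∀ (k : Nat) (n r : Int),
    pvIter f (k+1) n = some r → ∃ m, pvIter f k n = some m ∧ (pvDm f).get? m = some r := by
  intro k
  induction k with
  | zero => intro n r h
            cases hg : (pvDm f).get? n with
            | none => rw [iter_none_succ f 0 n hg] at h; cases h
            | some q => rw [iter_cons f 0 n q hg] at h
                        simp only [pvIter] at h; cases h
                        exact ⟨n, rfl, hg⟩
  | succ j ih =>
    intro n r h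
    cases hg : (pvDm f).get? n with
    | none => rw [iter_none_succ f (j+1) n hg] at h; cases h
    | some q =>
      rw [iter_cons f (j+1) n q hg] at h
      obtain ⟨m, h1, h2⟩ := ih q r h
      exact ⟨m, by rw [iter_cons f j n q hg]; exact h1, h2⟩

lemma iter_add (f : List (Int × Int)) : ∀ (a b : Nat) (n : Int),
    pvIter f (a+b) n = (pvIter f a n).bind (pvIter f b) := by
  intro a
  induction a with
  | zero => intro b n; simp [pvIter]
  | succ j ih =>
    intro b n
    cases hg : (pvDm f).get? n with
    | none => rw [iter_none_succ f _ n hg]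
              have : j+1+b = (j+b)+1 := by omega
              rw [this, iter_none_succ f _ n hg]; rfl
    | some q =>
      have : j+1+b = (j+b)+1 := by omega
      rw [this, iter_cons f (j+b) n q hg, iter_cons f j n q hg, ih]

-- climb follows the chain to the stated exit
lemma exits_climb (f : List (Int × Int)) : ∀ (j : Nat) (n r : Int) (fuel : Nat),
    pvIter f j n = some r → (pvDm f).get? r = none → j ≤ fuel →
    pvClimb (pvDm f) fuel n 0 = (r, j) := by
  intro j
  induction j with
  | zero =>
    intro n r fuel h1 h2 _
    simp only [pvIter] at h1; cases h1
    cases fuel with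
    | zero => rfl
    | succ fu => simp [pvClimb, h2]
  | succ j ih =>
    intro n r fuel h1 h2 hle
    cases hg : (pvDm f).get? n with
    | none => rw [iter_none_succ f j n hg] at h1; cases h1
    | some q =>
      rw [iter_cons f j n q hg] at h1
      cases fuel with
      | zero => omega
      | succ fu =>
        show pvClimb (pvDm f) (fu+1) n 0 = (r, j+1)
        simp only [pvClimb, hg]
        rw [climb_shift, ih q r fu h1 h2 (by omega)]; simp; omega

lemma exits_unique (f : List (Int × Int)) (n : Int) {j j' : Nat} {r r' : Int}
    (h1 : pvIter f j n = some r) (h2 : (pvDm f).get? r = none)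
    (h1' : pvIter f j' n = some r') (h2' : (pvDm f).get? r' = none) :
    j = j' ∧ r = r' := by
  rcases le_total j j' with hle | hle
  · obtain ⟨c, rfl⟩ := Nat.le.dest hle
    rw [iter_add, h1] at h1'
    cases c with
    | zero => simp only [pvIter, Option.bind_some] at h1'; cases h1'; exact ⟨by omega, rfl⟩
    | succ c => rw [Option.bind_some, iter_none_succ f c r h2] at h1'; cases h1'
  · obtain ⟨c, rfl⟩ := Nat.le.dest hle
    rw [iter_add, h1'] at h1
    cases c with
    | zero => simp only [pvIter, Option.bind_some] at h1; cases h1; exact ⟨by omega, rfl⟩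
    | succ c => rw [Option.bind_some, iter_none_succ f c r' h2'] at h1; cases h1


lemma key_exits (f : List (Int × Int)) : ∀ (m : Nat) (n : Int),
    (pvStep f)^[m] n ∉ pvKeys f →
    ∃ j ≤ m, ∃ r, pvIter f j n = some r ∧ (pvDm f).get? r = none := by
  intro m
  induction m with
  | zero => intro n h
            exact ⟨0, le_rfl, n, rfl, (get?_none_iff f n).mpr h⟩
  | succ m ih =>
    intro n h
    cases hg : (pvDm f).get? n with
    | none => exact ⟨0, by omega, n, rfl, hg⟩
    | some p =>
      have hstep : pvStep f n = p := by
        simp [pvStep, ← look_eq, hg]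
      rw [Function.iterate_succ_apply, hstep] at h
      obtain ⟨j, hj, r, h1, h2⟩ := ih p h
      exact ⟨j+1, by omega, r, by rw [iter_cons f j n p hg]; exact h1, h2⟩

-- under Pre_'s acyclicity, every chain exits within forest.length steps
lemma exits_all (f : List (Int × Int))
    (hac : ∀ k ∈ f.map (·.1), (pvStep f)^[f.length] k ∉ f.map (·.1)) (n : Int) :
    ∃ j ≤ f.length, ∃ r, pvIter f j n = some r ∧ (pvDm f).get? r = none := by
  by_cases h : n ∈ pvKeys f
  · exact key_exits f f.length n (hac n h)
  · exact ⟨0, by omega, n, rfl, (get?_none_iff f n).mpr h⟩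

-- the climb with full fuel: its result characterized
lemma climb_spec (f : List (Int × Int))
    (hac : ∀ k ∈ f.map (·.1), (pvStep f)^[f.length] k ∉ f.map (·.1)) (n : Int) :
    pvIter f (pvDp f n) n = some (pvRt f n) ∧ (pvDm f).get? (pvRt f n) = none ∧
      pvDp f n ≤ f.length := by
  obtain ⟨j, hj, r, h1, h2⟩ := exits_all f hac n
  have := exits_climb f j n r f.length h1 h2 hj
  have hrt : pvRt f n = r := by rw [pvRt, this]
  have hdp : pvDp f n = j := by rw [pvDp, this]
  rw [hrt, hdp]; exact ⟨h1, h2, hj⟩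

lemma reach_root (f : List (Int × Int))
    (hac : ∀ k ∈ f.map (·.1), (pvStep f)^[f.length] k ∉ f.map (·.1))
    {n r : Int} {k : Nat} (h1 : pvIter f k n = some r) (h2 : (pvDm f).get? r = none) :
    pvRt f n = r ∧ pvDp f n = k := by
  obtain ⟨hc1, hc2, _⟩ := climb_spec f hac n
  obtain ⟨hj, hr⟩ := exits_unique f n hc1 hc2 h1 h2
  exact ⟨hr, hj⟩

lemma iter_unique (f : List (Int × Int))
    (hac : ∀ k ∈ f.map (·.1), (pvStep f)^[f.length] k ∉ f.map (·.1))
    {n x : Int} {k k' : Nat} (h1 : pvIter f k n = some x) (h2 : pvIter f k' n = some x) :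
    k = k' := by
  -- a strictly later return to x would be a cycle, contradicting exits_all
  have cyc : ∀ (c : Nat), pvIter f (c+1) x = some x → False := by
    intro c hc
    obtain ⟨j, _, r, hr1, hr2⟩ := exits_all f hac x
    have hmul : ∀ m : Nat, pvIter f (m*(c+1)) x = some x := by
      intro m
      induction m with
      | zero => simp [pvIter]
      | succ m ih => have h4 : (m+1)*(c+1) = m*(c+1) + (c+1) := by ring
                     rw [h4, iter_add, ih, Option.bind_some]; exact hc
    have h3 := hmul (j+1)
    have hle : j + 1 ≤ (j+1)*(c+1) := Nat.le_mul_of_pos_right _ (by omega)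
    have hbig : (j+1)*(c+1) = j + ((j+1)*(c+1) - j) := by omega
    rw [hbig, iter_add, hr1, Option.bind_some] at h3
    have hpos : 1 ≤ (j+1)*(c+1) - j := by omega
    obtain ⟨e, he⟩ := Nat.exists_eq_add_of_le hpos
    rw [he] at h3
    have : pvIter f (1+e) r = none := by
      rw [Nat.add_comm, iter_none_succ f e r hr2]
    rw [this] at h3; cases h3
  rcases lt_trichotomy k k' with h | h | h
  · obtain ⟨c, hc⟩ := Nat.exists_eq_add_of_lt h
    rw [hc, show k+c+1 = k+(c+1) by omega, iter_add, h1, Option.bind_some] at h2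
    exact absurd h2 (fun hx => cyc c hx)
  · exact h
  · obtain ⟨c, hc⟩ := Nat.exists_eq_add_of_lt h
    rw [hc, show k'+c+1 = k'+(c+1) by omega, iter_add, h2, Option.bind_some] at h1
    exact absurd h1 (fun hx => cyc c hx)

lemma iter_split (f : List (Int × Int))
    (hac : ∀ k ∈ f.map (·.1), (pvStep f)^[f.length] k ∉ f.map (·.1))
    {n x : Int} {a : Nat} (h : pvIter f a n = some x) :
    pvRt f n = pvRt f x ∧ pvDp f n = a + pvDp f x := by
  obtain ⟨hc1, hc2, _⟩ := climb_spec f hac x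
  have : pvIter f (a + pvDp f x) n = some (pvRt f x) := by
    rw [iter_add, h, Option.bind_some]; exact hc1
  exact reach_root f hac this hc2

-- ===== adjacency (A side) =====
def pvStepA (d : PySem.Dict Int (List Int)) (cp : Int × Int) : PySem.Dict Int (List Int) :=
  (if d.contains cp.2 then d else d.insert cp.2 ([] : List Int)).modify cp.2 []
    (fun l => l ++ [cp.1])

lemma stepA_getD (d : PySem.Dict Int (List Int)) (cp : Int × Int) (c : Int) :
    (pvStepA d cp).getD c [] = if cp.2 = c then d.getD c [] ++ [cp.1] else d.getD c [] := by
  unfold pvStepA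
  by_cases hc : d.contains cp.2
  · rw [if_pos hc, PySem.Dict.getD_modify]
    by_cases h : c = cp.2
    · subst h; simp
    · rw [if_neg h, if_neg (fun hx => h hx.symm)]
  · rw [if_neg hc, PySem.Dict.getD_modify]
    by_cases h : c = cp.2
    · subst h
      rw [if_pos rfl, PySem.Dict.getD_insert, if_pos rfl]
      rw [PySem.Dict.getD_of_not_contains (h := by simpa using hc)]
      simp
    · rw [if_neg h, if_neg (fun hx => h hx.symm), PySem.Dict.getD_insert, if_neg h]

lemma stepA_contains (d : PySem.Dict Int (List Int)) (cp : Int × Int) (c : Int) :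
    (pvStepA d cp).contains c = (d.contains c || (cp.2 == c)) := by
  unfold pvStepA
  by_cases hc : d.contains cp.2
  · rw [if_pos hc, PySem.Dict.contains_modify]
    by_cases h : c = cp.2
    · subst h; simp [hc]
    · rw [show (c == cp.2) = false by simp [h],
          show (cp.2 == c) = false by simp [Ne.symm h]]
      simp
  · rw [if_neg hc, PySem.Dict.contains_modify, PySem.Dict.contains_insert]
    by_cases h : c = cp.2
    · subst h; simp
    · rw [show (c == cp.2) = false by simp [h],
          show (cp.2 == c) = false by simp [Ne.symm h]]
      simp

lemma adj_getD (c : Int) : ∀ (l : List (Int × Int)) (d : PySem.Dict Int (List Int)),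
    (l.foldl pvStepA d).getD c [] = d.getD c [] ++ (l.filter (fun p => p.2 == c)).map (·.1) := by
  intro l
  induction l with
  | nil => intro d; simp
  | cons cp t ih =>
    intro d
    rw [List.foldl_cons, ih, List.filter_cons]
    by_cases h : cp.2 = c
    · rw [if_pos (by simpa using h), stepA_getD, if_pos h]; simp
    · rw [if_neg (by simpa using h), stepA_getD, if_neg h]

lemma adj_contains (c : Int) : ∀ (l : List (Int × Int)) (d : PySem.Dict Int (List Int)),
    (l.foldl pvStepA d).contains c = (d.contains c || l.any (fun p => p.2 == c)) := by
  intro l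
  induction l with
  | nil => intro d; simp
  | cons cp t ih =>
    intro d
    rw [List.foldl_cons, ih, stepA_contains, List.any_cons]
    cases hd : d.contains c <;> cases hc : (cp.2 == c) <;> simp

lemma adj_get? (f : List (Int × Int)) (c : Int) :
    (f.foldl pvStepA PySem.Dict.empty).get? c =
      if (f.filter (fun p => p.2 == c)) = [] then none
      else some ((f.filter (fun p => p.2 == c)).map (·.1)) := by
  have hcont : (f.foldl pvStepA PySem.Dict.empty).contains c = f.any (fun p => p.2 == c) := by
    rw [adj_contains, PySem.Dict.contains_empty]; simp
  have hgd := adj_getD c f PySem.Dict.empty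
  rw [PySem.Dict.getD_empty] at hgd
  simp only [List.nil_append] at hgd
  by_cases h : (f.filter (fun p => p.2 == c)) = []
  · rw [if_pos h]
    have : f.any (fun p => p.2 == c) = false := by
      rw [List.any_eq_false]
      intro p hp
      simpa using List.filter_eq_nil_iff.mp h p hp
    rw [← Option.not_isSome_iff_eq_none, ← PySem.Dict.contains_eq_isSome_get?, hcont, this]
    simp
  · rw [if_neg h]
    have hs : (f.foldl pvStepA PySem.Dict.empty).contains c = true := by
      rw [hcont, List.any_eq_true]
      obtain ⟨p, hp⟩ := List.exists_mem_of_ne_nil _ h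
      rw [List.mem_filter] at hp
      exact ⟨p, hp.1, hp.2⟩
    rw [PySem.Dict.contains_eq_isSome_get?] at hs
    obtain ⟨v, hv⟩ := Option.isSome_iff_exists.mp hs
    rw [hv]
    rw [PySem.Dict.getD_eq_get?_getD, hv] at hgd
    simpa using hgd

-- ===== node set, distances, A-side max =====
def pvNodes (f : List (Int × Int)) : List Int :=
  PySem.Set.union (PySem.Set.ofList (f.map (·.1))) (PySem.Set.ofList (f.map (·.2)))
def pvDTo (f : List (Int × Int)) (x n : Int) : Option Nat :=
  (List.range (f.length+1)).find? (fun k => pvIter f k n == some x)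
def pvMx (f : List (Int × Int)) (x : Int) : Int :=
  ((pvNodes f).filterMap (fun n => (pvDTo f x n).map (fun k => (k:Int)+1))).foldl max 0

lemma mem_nodes (f : List (Int × Int)) (n : Int) :
    n ∈ pvNodes f ↔ n ∈ f.map (·.1) ∨ n ∈ f.map (·.2) := by
  simp [pvNodes, PySem.Set.mem_union, PySem.Set.mem_ofList]

lemma nodes_nodup (f : List (Int × Int)) : (pvNodes f).Nodup :=
  PySem.Set.nodup_union _ _ (PySem.Set.nodup_ofList _)

lemma child_iff (f : List (Int × Int)) (hnd : (f.map (·.1)).Nodup) (c x : Int) :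
    (pvDm f).get? c = some x ↔ (c, x) ∈ f := by
  constructor
  · intro h; exact PySem.Dict.mem_items_of_get?_eq_some _ h
  · intro h
    exact (PySem.Dict.get?_eq_some_iff_mem_items (pvDm f) c x (by exact hnd)).mpr h

lemma maxChar {l : List Int} {v : Int} (hmem : v ∈ l) (hub : ∀ y ∈ l, y ≤ v) (h0 : 0 ≤ v) :
    l.foldl max 0 = v := by
  apply le_antisymm
  · rcases PySem.List.foldl_max_mem l 0 with h | h
    · rw [h]; exact h0
    · exact hub _ h
  · exact (PySem.List.le_foldl_max l 0).2 v hmem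


lemma dTo_some_iff (f : List (Int × Int))
    (hac : ∀ k ∈ f.map (·.1), (pvStep f)^[f.length] k ∉ f.map (·.1)) (x n : Int) (k : Nat) :
    pvDTo f x n = some k ↔ (k ≤ f.length ∧ pvIter f k n = some x) := by
  constructor
  · intro h
    have h1 := List.find?_some h
    have h2 := List.mem_range.mp (List.mem_of_find?_eq_some h)
    exact ⟨by omega, by simpa using h1⟩
  · rintro ⟨hk, hit⟩
    have hsome : (pvDTo f x n).isSome := by
      rw [pvDTo, List.find?_isSome]
      exact ⟨k, List.mem_range.mpr (by omega), by simpa using hit⟩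
    obtain ⟨k', hk'⟩ := Option.isSome_iff_exists.mp hsome
    have h1 : pvIter f k' n = some x := by simpa using List.find?_some hk'
    rw [hk', iter_unique f hac h1 hit]


lemma mem_children_iff (f : List (Int × Int)) (c x : Int) :
    c ∈ (f.filter (fun p => p.2 == x)).map (·.1) ↔ (c, x) ∈ f := by
  simp only [List.mem_map, List.mem_filter, beq_iff_eq]
  constructor
  · rintro ⟨⟨a, b⟩, ⟨hm, hb⟩, ha⟩; simp only at hb ha; rw [← ha, ← hb]; exact hm
  · intro h; exact ⟨(c, x), ⟨h, rfl⟩, rfl⟩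

lemma mem_mx_list (f : List (Int × Int)) (x : Int) (e : Int) :
    e ∈ (pvNodes f).filterMap (fun n => (pvDTo f x n).map (fun k => (k:Int)+1)) ↔
      ∃ n ∈ pvNodes f, ∃ k, pvDTo f x n = some k ∧ e = (k:Int)+1 := by
  rw [List.mem_filterMap]
  constructor
  · rintro ⟨n, hn, hmap⟩
    rcases hdto : pvDTo f x n with _ | k
    · rw [hdto] at hmap; cases hmap
    · rw [hdto] at hmap
      have hmap' : some ((k:Int)+1) = some e := hmap
      cases hmap'
      exact ⟨n, hn, k, hdto, rfl⟩
  · rintro ⟨n, hn, k, hk, rfl⟩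
    exact ⟨n, hn, by rw [hk]; rfl⟩

lemma core_height (f : List (Int × Int)) (hnd : (f.map (·.1)).Nodup)
    (hac : ∀ k ∈ f.map (·.1), (pvStep f)^[f.length] k ∉ f.map (·.1)) :
    ∀ (fuel : Nat) (x : Int), x ∈ pvNodes f →
    (∀ n ∈ pvNodes f, ∀ k, pvIter f k n = some x → k < fuel) →
    pvDfsHeight (f.foldl pvStepA PySem.Dict.empty) fuel x = pvMx f x := by
  intro fuel
  induction fuel with
  | zero =>
    intro x hx hb
    exact absurd (hb x hx 0 rfl) (by omega)
  | succ fu ih =>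
    intro x hx hb
    have hdto_self : pvDTo f x x = some 0 :=
      (dTo_some_iff f hac x x 0).mpr ⟨by omega, rfl⟩
    rcases hadj : (f.foldl pvStepA PySem.Dict.empty).get? x with _ | cs
    · -- no children: nobody's parent is x
      have hnoc : ∀ n : Int, (pvDm f).get? n ≠ some x := by
        intro n hn
        have hmem : (n, x) ∈ f := PySem.Dict.mem_items_of_get?_eq_some _ hn
        have h' := adj_get? f x
        rw [hadj] at h'
        by_cases hemp : f.filter (fun p => p.2 == x) = []
        · have := List.filter_eq_nil_iff.mp hemp (n, x) hmem
          simp at this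
        · rw [if_neg hemp] at h'; cases h'
      have hred : pvDfsHeight (f.foldl pvStepA PySem.Dict.empty) (fu+1) x =
          (match (f.foldl pvStepA PySem.Dict.empty).get? x with
           | none => (1:Int)
           | some cs => 1 + (PySem.List.max? (cs.map (pvDfsHeight (f.foldl pvStepA PySem.Dict.empty) fu)) (fun x => x)).getD 0) := rfl
      rw [hred, hadj]
      show (1:Int) = pvMx f x
      symm
      apply maxChar
      · exact (mem_mx_list f x 1).mpr ⟨x, hx, 0, hdto_self, by simp⟩
      · intro y hy
        obtain ⟨n, hn, k, hk, rfl⟩ := (mem_mx_list f x _).mp hy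
        obtain ⟨hkL, hit⟩ := (dTo_some_iff f hac x n k).mp hk
        cases k with
        | zero => simp
        | succ j =>
          obtain ⟨m, _, h2⟩ := iter_last f j n x hit
          exact absurd h2 (hnoc m)
      · omega
    · -- children cs
      have h' := adj_get? f x
      rw [hadj] at h'
      by_cases hemp : f.filter (fun p => p.2 == x) = []
      · rw [if_pos hemp] at h'; cases h'
      rw [if_neg hemp] at h'
      have hcs : cs = (f.filter (fun p => p.2 == x)).map (·.1) := by
        injection h'
      have hcs_ne : cs ≠ [] := by
        rw [hcs]; simpa using hemp
      have hchild : ∀ c ∈ cs, (pvDm f).get? c = some x := by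
        intro c hc
        rw [hcs] at hc
        exact (child_iff f hnd c x).mpr ((mem_children_iff f c x).mp hc)
      have hih : ∀ c ∈ cs, pvDfsHeight (f.foldl pvStepA PySem.Dict.empty) fu c = pvMx f c := by
        intro c hc
        apply ih c
        · have h1 : (pvDm f).get? c = some x := hchild c hc
          have h2 : (c, x) ∈ f := PySem.Dict.mem_items_of_get?_eq_some _ h1
          exact (mem_nodes f c).mpr (Or.inl (List.mem_map.mpr ⟨(c, x), h2, rfl⟩))
        · intro n hn k hit
          have h1 : pvIter f (k+1) n = some x := iter_snoc f k n c x hit (hchild c hc)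
          have := hb n hn (k+1) h1
          omega
      have hne2 : cs.map (pvDfsHeight (f.foldl pvStepA PySem.Dict.empty) fu) ≠ [] := by
        simpa using hcs_ne
      obtain ⟨y, t, hyt⟩ := List.exists_cons_of_ne_nil hne2
      obtain ⟨m, hm⟩ : ∃ m, PySem.List.max?
          (cs.map (pvDfsHeight (f.foldl pvStepA PySem.Dict.empty) fu)) (fun x => x) = some m := by
        rw [hyt, PySem.List.max?_id_cons]; exact ⟨_, rfl⟩
      have hmmem := PySem.List.max?_mem hm
      have hmub := PySem.List.max?_isMax hm
      obtain ⟨c0, hc0, hmc0⟩ := List.mem_map.mp hmmem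
      rw [hih c0 hc0] at hmc0
      have hc0nodes : c0 ∈ pvNodes f := by
        have h2 : (c0, x) ∈ f := PySem.Dict.mem_items_of_get?_eq_some _ (hchild c0 hc0)
        exact (mem_nodes f c0).mpr (Or.inl (List.mem_map.mpr ⟨(c0, x), h2, rfl⟩))
      have hc0_1 : (1:Int) ∈ (pvNodes f).filterMap (fun n => (pvDTo f c0 n).map (fun k => (k:Int)+1)) := by
        apply (mem_mx_list f c0 1).mpr
        exact ⟨c0, hc0nodes, 0, (dTo_some_iff f hac c0 c0 0).mpr ⟨by omega, rfl⟩, by simp⟩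
      have hm1 : (1:Int) ≤ m := by
        rw [← hmc0]
        exact (PySem.List.le_foldl_max _ 0).2 1 hc0_1
      have hred : pvDfsHeight (f.foldl pvStepA PySem.Dict.empty) (fu+1) x =
          (match (f.foldl pvStepA PySem.Dict.empty).get? x with
           | none => (1:Int)
           | some cs => 1 + (PySem.List.max? (cs.map (pvDfsHeight (f.foldl pvStepA PySem.Dict.empty) fu)) (fun x => x)).getD 0) := rfl
      rw [hred, hadj]
      show 1 + (PySem.List.max? (cs.map (pvDfsHeight (f.foldl pvStepA PySem.Dict.empty) fu)) (fun x => x)).getD 0 = pvMx f x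
      rw [hm, Option.getD_some]
      symm
      apply maxChar
      · rcases PySem.List.foldl_max_mem ((pvNodes f).filterMap (fun n => (pvDTo f c0 n).map (fun k => (k:Int)+1))) 0 with hz | hz
        · rw [pvMx] at hmc0; rw [hz] at hmc0; omega
        · rw [pvMx] at hmc0
          rw [hmc0] at hz
          obtain ⟨n0, hn0, k0, hk0, he0⟩ := (mem_mx_list f c0 _).mp hz
          obtain ⟨hk0L, hit0⟩ := (dTo_some_iff f hac c0 n0 k0).mp hk0
          have hnext : pvIter f (k0+1) n0 = some x := iter_snoc f k0 n0 c0 x hit0 (hchild c0 hc0)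
          have hsplit := iter_split f hac hnext
          have hdpn0 : pvDp f n0 ≤ f.length := (climb_spec f hac n0).2.2
          have hk1L : k0 + 1 ≤ f.length := by omega
          apply (mem_mx_list f x _).mpr
          refine ⟨n0, hn0, k0+1, (dTo_some_iff f hac x n0 (k0+1)).mpr ⟨hk1L, hnext⟩, ?_⟩
          rw [he0]; push_cast; ring
      · intro y' hy'
        obtain ⟨n, hn, k, hk, rfl⟩ := (mem_mx_list f x _).mp hy'
        obtain ⟨hkL, hit⟩ := (dTo_some_iff f hac x n k).mp hk
        cases k with
        | zero => omega
        | succ j =>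
          obtain ⟨m', h1, h2⟩ := iter_last f j n x hit
          have hm'cs : m' ∈ cs := by
            rw [hcs]
            exact (mem_children_iff f m' x).mpr (PySem.Dict.mem_items_of_get?_eq_some _ h2)
          have hjel : ((j:Int)+1) ∈ (pvNodes f).filterMap (fun n => (pvDTo f m' n).map (fun k => (k:Int)+1)) :=
            (mem_mx_list f m' _).mpr ⟨n, hn, j, (dTo_some_iff f hac m' n j).mpr ⟨by omega, h1⟩, rfl⟩
          have hjm : (j:Int)+1 ≤ pvMx f m' :=
            (PySem.List.le_foldl_max _ 0).2 _ hjel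
          have hle2 : pvMx f m' ≤ m := by
            rw [← hih m' hm'cs]
            exact hmub _ (List.mem_map.mpr ⟨m', hm'cs, rfl⟩)
          push_cast
          omega
      · omega

-- ===== B-side fold =====
def pvStepB (f : List (Int × Int)) (h : PySem.Dict Int Int) (n : Int) : PySem.Dict Int Int :=
  h.insert (pvRt f n) (max (h.getD (pvRt f n) 0) ((pvDp f n : Int) + 1))

lemma hb_getD (f : List (Int × Int)) (r : Int) : ∀ (l : List Int) (h : PySem.Dict Int Int),
    (l.foldl (pvStepB f) h).getD r 0 =
      (l.filterMap (fun n => if pvRt f n = r then some ((pvDp f n : Int)+1) else none)).foldl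
        max (h.getD r 0) := by
  intro l
  induction l with
  | nil => intro h; simp
  | cons n t ih =>
    intro h
    rw [List.foldl_cons, ih, List.filterMap_cons]
    by_cases hr : pvRt f n = r
    · rw [if_pos hr, List.foldl_cons]
      congr 1
      unfold pvStepB
      rw [PySem.Dict.getD_insert, hr, if_pos rfl]
    · rw [if_neg hr]
      congr 1
      unfold pvStepB
      rw [PySem.Dict.getD_insert, if_neg (fun hx => hr hx.symm)]

lemma hb_keys (f : List (Int × Int)) :
    ((pvNodes f).foldl (pvStepB f) PySem.Dict.empty).keys =
      PySem.Set.ofList ((pvNodes f).map (pvRt f)) := by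
  have h1 : (pvNodes f).foldl (pvStepB f) PySem.Dict.empty =
      (pvNodes f).foldl (fun d x => d.insert (pvRt f x)
        ((fun (d : PySem.Dict Int Int) (x : Int) =>
          max (d.getD (pvRt f x) 0) ((pvDp f x : Int) + 1)) d x)) PySem.Dict.empty := rfl
  rw [h1, PySem.Dict.keys_foldl_insert_key]
  show PySem.Set.update ([] : List Int) _ = _
  rw [PySem.Set.update_nil_left]

lemma hb_nodup_keys (f : List (Int × Int)) :
    ((pvNodes f).foldl (pvStepB f) PySem.Dict.empty).keys.Nodup := by
  have h1 : (pvNodes f).foldl (pvStepB f) PySem.Dict.empty =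
      (pvNodes f).foldl (fun d x => d.insert (pvRt f x)
        ((fun (d : PySem.Dict Int Int) (x : Int) =>
          max (d.getD (pvRt f x) 0) ((pvDp f x : Int) + 1)) d x)) PySem.Dict.empty := rfl
  rw [h1]
  exact PySem.Dict.nodup_keys_foldl_insert_key _ _ _ _ (by simp [PySem.Dict.keys_empty])

-- at a root, the A-side max list coincides with the B-side grouped list
lemma mx_at_root (f : List (Int × Int))
    (hac : ∀ k ∈ f.map (·.1), (pvStep f)^[f.length] k ∉ f.map (·.1))
    (r : Int) (hr : (pvDm f).get? r = none) :
    pvMx f r = ((pvNodes f).filterMap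
      (fun n => if pvRt f n = r then some ((pvDp f n : Int)+1) else none)).foldl max 0 := by
  unfold pvMx
  congr 1
  apply List.filterMap_congr
  intro n _
  by_cases hrt : pvRt f n = r
  · rw [if_pos hrt]
    have hspec := climb_spec f hac n
    have : pvDTo f r n = some (pvDp f n) := by
      apply (dTo_some_iff f hac r n (pvDp f n)).mpr
      exact ⟨hspec.2.2, by rw [hspec.1, hrt]⟩
    rw [this]; simp
  · rw [if_neg hrt]
    cases hdto : pvDTo f r n with
    | none => rfl
    | some k =>
      obtain ⟨hkL, hit⟩ := (dTo_some_iff f hac r n k).mp hdto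
      exact absurd (reach_root f hac hit hr).1 hrt

-- ===== assembly =====
def pvRootsL (f : List (Int × Int)) : List Int :=
  PySem.Set.diff (pvNodes f) (PySem.Set.ofList (f.map (·.1)))
def pvAdj (f : List (Int × Int)) : PySem.Dict Int (List Int) := f.foldl pvStepA PySem.Dict.empty
def pvHA (f : List (Int × Int)) (r : Int) : Int := pvDfsHeight (pvAdj f) (f.length+1) r
def pvHeights (f : List (Int × Int)) : PySem.Dict Int Int :=
  (pvNodes f).foldl (pvStepB f) PySem.Dict.empty
def pvRootsDict (f : List (Int × Int)) : PySem.Dict Int Int :=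
  (pvRootsL f).foldl (fun d r => d.insert r (pvHA f r)) PySem.Dict.empty

lemma A_eq (f : List (Int × Int)) (hne : ¬ f = []) : tallest_tree_root f =
    (PySem.List.min? ((pvRootsDict f).items.foldl
      (fun acc p => if p.2 = (PySem.List.max? (pvRootsDict f).values (fun x => x)).getD 0
        then acc ++ [p.1] else acc) []) (fun x => x)).getD 0 := by
  simp only [tallest_tree_root, if_neg hne]
  rfl

lemma B_eq (f : List (Int × Int)) (hne : ¬ f = []) : tallest_tree_root_alt f =
    (PySem.List.min? ((pvHeights f).items.filterMap
      (fun p => if p.2 = (PySem.List.max? (pvHeights f).values (fun x => x)).getD 0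
        then some p.1 else none)) (fun x => x)).getD 0 := by
  simp only [tallest_tree_root_alt, if_neg hne]
  rfl

lemma rt_not_key (f : List (Int × Int))
    (hac : ∀ k ∈ f.map (·.1), (pvStep f)^[f.length] k ∉ f.map (·.1)) (n : Int) :
    (pvDm f).get? (pvRt f n) = none := (climb_spec f hac n).2.1

lemma root_fixed (f : List (Int × Int))
    (hac : ∀ k ∈ f.map (·.1), (pvStep f)^[f.length] k ∉ f.map (·.1)) (r : Int)
    (hr : (pvDm f).get? r = none) : pvRt f r = r :=
  (reach_root f hac (k := 0) rfl hr).1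

lemma rt_mem_nodes (f : List (Int × Int))
    (hac : ∀ k ∈ f.map (·.1), (pvStep f)^[f.length] k ∉ f.map (·.1)) (n : Int)
    (hn : n ∈ pvNodes f) : pvRt f n ∈ pvNodes f := by
  obtain ⟨h1, _, _⟩ := climb_spec f hac n
  cases hdp : pvDp f n with
  | zero => rw [hdp] at h1
            simp only [pvIter] at h1
            injection h1 with h1
            rw [← h1]; exact hn
  | succ j =>
    rw [hdp] at h1
    obtain ⟨m, _, h3⟩ := iter_last f j n _ h1
    have : (m, pvRt f n) ∈ f := PySem.Dict.mem_items_of_get?_eq_some _ h3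
    exact (mem_nodes f _).mpr (Or.inr (List.mem_map.mpr ⟨(m, pvRt f n), this, rfl⟩))

lemma mem_rootsL (f : List (Int × Int)) (r : Int) :
    r ∈ pvRootsL f ↔ r ∈ pvNodes f ∧ r ∉ f.map (·.1) := by
  rw [pvRootsL, PySem.Set.mem_diff]
  simp [PySem.Set.mem_ofList]

lemma keysB_eq (f : List (Int × Int)) :
    (pvHeights f).keys = PySem.Set.ofList ((pvNodes f).map (pvRt f)) := hb_keys f

lemma mem_keysB_iff_root (f : List (Int × Int))
    (hac : ∀ k ∈ f.map (·.1), (pvStep f)^[f.length] k ∉ f.map (·.1)) (r : Int) :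
    r ∈ (pvHeights f).keys ↔ r ∈ pvRootsL f := by
  rw [keysB_eq, PySem.Set.mem_ofList, mem_rootsL]
  constructor
  · rintro h
    obtain ⟨n, hn, rfl⟩ := List.mem_map.mp h
    refine ⟨rt_mem_nodes f hac n hn, ?_⟩
    have := rt_not_key f hac n
    exact (get?_none_iff f _).mp this
  · rintro ⟨hn, hk⟩
    refine List.mem_map.mpr ⟨r, hn, ?_⟩
    exact root_fixed f hac r ((get?_none_iff f r).mpr hk)

lemma HA_eq_HB (f : List (Int × Int)) (hnd : (f.map (·.1)).Nodup)
    (hac : ∀ k ∈ f.map (·.1), (pvStep f)^[f.length] k ∉ f.map (·.1)) (r : Int)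
    (hr : r ∈ pvRootsL f) : pvHA f r = (pvHeights f).getD r 0 := by
  obtain ⟨hrn, hrk⟩ := (mem_rootsL f r).mp hr
  have hrnone : (pvDm f).get? r = none := (get?_none_iff f r).mpr hrk
  have h1 : pvHA f r = pvMx f r := by
    apply core_height f hnd hac (f.length+1) r hrn
    intro n hn k hit
    obtain ⟨_, hdp⟩ := reach_root f hac hit hrnone
    have := (climb_spec f hac n).2.2
    omega
  rw [h1, mx_at_root f hac r hrnone, pvHeights, hb_getD, PySem.Dict.getD_empty]

lemma itemsA_eq (f : List (Int × Int)) :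
    (pvRootsDict f).items = (pvRootsL f).map (fun r => (r, pvHA f r)) := by
  rw [pvRootsDict]
  have h := PySem.Dict.items_foldl_insert_fresh (pvRootsL f) (fun r => r) (pvHA f)
    PySem.Dict.empty (by intro a _; exact PySem.Dict.contains_empty a)
    (by simpa using PySem.Set.nodup_diff _ _ (nodes_nodup f))
  simpa using h

lemma itemsB_eq (f : List (Int × Int)) :
    (pvHeights f).items = (pvHeights f).keys.map (fun k => (k, (pvHeights f).getD k 0)) :=
  PySem.Dict.items_eq_map_keys _ (hb_nodup_keys f) 0

lemma max_ext {l1 l2 : List Int} (hm : ∀ x, x ∈ l1 ↔ x ∈ l2) (hne : l1 ≠ []) :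
    PySem.List.max? l1 (fun x => x) = PySem.List.max? l2 (fun x => x) := by
  obtain ⟨a, t, rfl⟩ := List.exists_cons_of_ne_nil hne
  have hne2 : l2 ≠ [] := by
    intro h; rw [h] at hm; exact absurd ((hm a).mp List.mem_cons_self) (by simp)
  obtain ⟨b, s, rfl⟩ := List.exists_cons_of_ne_nil hne2
  obtain ⟨m1, h1⟩ : ∃ m, PySem.List.max? (a :: t) (fun x => x) = some m := by
    rw [PySem.List.max?_id_cons]; exact ⟨_, rfl⟩
  obtain ⟨m2, h2⟩ : ∃ m, PySem.List.max? (b :: s) (fun x => x) = some m := by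
    rw [PySem.List.max?_id_cons]; exact ⟨_, rfl⟩
  rw [h1, h2]
  have e1 : m1 ≤ m2 := PySem.List.max?_isMax h2 m1 ((hm m1).mp (PySem.List.max?_mem h1))
  have e2 : m2 ≤ m1 := PySem.List.max?_isMax h1 m2 ((hm m2).mpr (PySem.List.max?_mem h2))
  rw [le_antisymm e1 e2]

lemma min_ext {l1 l2 : List Int} (hm : ∀ x, x ∈ l1 ↔ x ∈ l2) (hne : l1 ≠ []) :
    PySem.List.min? l1 (fun x => x) = PySem.List.min? l2 (fun x => x) := by
  obtain ⟨a, t, rfl⟩ := List.exists_cons_of_ne_nil hne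
  have hne2 : l2 ≠ [] := by
    intro h; rw [h] at hm; exact absurd ((hm a).mp List.mem_cons_self) (by simp)
  obtain ⟨b, s, rfl⟩ := List.exists_cons_of_ne_nil hne2
  obtain ⟨m1, h1⟩ : ∃ m, PySem.List.min? (a :: t) (fun x => x) = some m := by
    rw [PySem.List.min?_id_cons]; exact ⟨_, rfl⟩
  obtain ⟨m2, h2⟩ : ∃ m, PySem.List.min? (b :: s) (fun x => x) = some m := by
    rw [PySem.List.min?_id_cons]; exact ⟨_, rfl⟩
  rw [h1, h2]
  have e1 : m2 ≤ m1 := PySem.List.min?_isMin h2 m1 ((hm m1).mp (PySem.List.min?_mem h1))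
  have e2 : m1 ≤ m2 := PySem.List.min?_isMin h1 m2 ((hm m2).mpr (PySem.List.min?_mem h2))
  rw [le_antisymm e2 e1]

theorem main_equiv (f : List (Int × Int)) (hnd : (f.map (·.1)).Nodup)
    (hac : ∀ k ∈ f.map (·.1), (pvStep f)^[f.length] k ∉ f.map (·.1)) :
    tallest_tree_root f = tallest_tree_root_alt f := by
  by_cases hne : f = []
  · subst hne; rfl
  · rw [A_eq f hne, B_eq f hne]
    -- roots nonempty
    obtain ⟨p, t, rfl⟩ := List.exists_cons_of_ne_nil hne
    set f := p :: t with hf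
    have hkey : p.1 ∈ f.map (·.1) := by rw [hf]; simp
    have hknodes : p.1 ∈ pvNodes f := (mem_nodes f _).mpr (Or.inl hkey)
    have hr0 : pvRt f p.1 ∈ pvRootsL f := by
      rw [mem_rootsL]
      exact ⟨rt_mem_nodes f hac _ hknodes, (get?_none_iff f _).mp (rt_not_key f hac _)⟩
    have hroots_ne : pvRootsL f ≠ [] := fun h => by rw [h] at hr0; exact absurd hr0 (by simp)
    -- values of A-dict and B-dict
    have hvaluesA : (pvRootsDict f).values = (pvRootsL f).map (pvHA f) := by
      show ((pvRootsDict f).items).map (·.2) = _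
      rw [itemsA_eq, List.map_map]; rfl
    have hvaluesB : (pvHeights f).values = (pvHeights f).keys.map
        (fun k => (pvHeights f).getD k 0) :=
      PySem.Dict.values_eq_map_keys _ (hb_nodup_keys f) 0
    have hvmem : ∀ x, x ∈ (pvRootsDict f).values ↔ x ∈ (pvHeights f).values := by
      intro x
      rw [hvaluesA, hvaluesB]
      constructor
      · intro hx
        obtain ⟨r, hr, rfl⟩ := List.mem_map.mp hx
        refine List.mem_map.mpr ⟨r, (mem_keysB_iff_root f hac r).mpr hr, ?_⟩
        rw [HA_eq_HB f hnd hac r hr]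
      · intro hx
        obtain ⟨r, hr, rfl⟩ := List.mem_map.mp hx
        have hr' := (mem_keysB_iff_root f hac r).mp hr
        refine List.mem_map.mpr ⟨r, hr', ?_⟩
        rw [HA_eq_HB f hnd hac r hr']
    have hvAne : (pvRootsDict f).values ≠ [] := by
      rw [hvaluesA]
      simpa using hroots_ne
    have hmax : PySem.List.max? (pvRootsDict f).values (fun x => x) =
        PySem.List.max? (pvHeights f).values (fun x => x) := max_ext hvmem hvAne
    set maxA := (PySem.List.max? (pvRootsDict f).values (fun x => x)).getD 0 with hmaxA
    have hmaxB : (PySem.List.max? (pvHeights f).values (fun x => x)).getD 0 = maxA := by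
      rw [← hmax]
    rw [hmaxB]
    -- the tie lists
    have htiesA : ((pvRootsDict f).items.foldl
        (fun acc p => if p.2 = maxA then acc ++ [p.1] else acc) []) =
        (((pvRootsDict f).items.filter (fun p => p.2 == maxA)).map (·.1)) := by
      have hstep : (fun (acc : List Int) (p : Int × Int) => if p.2 = maxA then acc ++ [p.1] else acc)
          = (fun (acc : List Int) (p : Int × Int) =>
              if ((fun q : Int × Int => q.2 == maxA) p) = true then acc ++ [(fun q : Int × Int => q.1) p] else acc) := by
        funext acc q; simp [beq_iff_eq]
      rw [hstep, PySem.List.foldl_append_if (fun q : Int × Int => q.2 == maxA) (fun q : Int × Int => q.1)]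
      simp
    have hmemA : ∀ x, x ∈ ((pvRootsDict f).items.foldl
        (fun acc p => if p.2 = maxA then acc ++ [p.1] else acc) []) ↔
        ∃ r ∈ pvRootsL f, pvHA f r = maxA ∧ x = r := by
      intro x
      rw [htiesA, itemsA_eq]
      constructor
      · intro hx
        obtain ⟨q, hq, hq1⟩ := List.mem_map.mp hx
        obtain ⟨hqm, hqb⟩ := List.mem_filter.mp hq
        obtain ⟨r, hr, hre⟩ := List.mem_map.mp hqm
        rw [← hre] at hqb hq1
        exact ⟨r, hr, by simpa using hqb, hq1.symm⟩
      · rintro ⟨r, hr, hb, rfl⟩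
        exact List.mem_map.mpr ⟨(x, pvHA f x),
          List.mem_filter.mpr ⟨List.mem_map.mpr ⟨x, hr, rfl⟩, by simpa using hb⟩, rfl⟩
    have hmemB : ∀ x, x ∈ ((pvHeights f).items.filterMap
        (fun p => if p.2 = maxA then some p.1 else none)) ↔
        ∃ k ∈ (pvHeights f).keys, (pvHeights f).getD k 0 = maxA ∧ x = k := by
      intro x
      rw [List.mem_filterMap]
      constructor
      · rintro ⟨⟨a, b⟩, hmem, hif⟩
        by_cases hb : b = maxA
        · rw [if_pos hb] at hif
          injection hif with hif
          rw [itemsB_eq] at hmem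
          obtain ⟨k, hk, heq⟩ := List.mem_map.mp hmem
          have ha : k = a := congrArg Prod.fst heq
          have hbv : (pvHeights f).getD k 0 = b := congrArg Prod.snd heq
          refine ⟨a, by rw [← ha]; exact hk, ?_, hif.symm⟩
          rw [← ha, hbv]; exact hb
        · rw [if_neg hb] at hif; cases hif
      · rintro ⟨k, hk, hb, rfl⟩
        refine ⟨(x, (pvHeights f).getD x 0), ?_, ?_⟩
        · rw [itemsB_eq]; exact List.mem_map.mpr ⟨x, hk, rfl⟩
        · rw [if_pos hb]
    -- the two tie lists have the same members
    have hmemAB : ∀ x, x ∈ ((pvRootsDict f).items.foldl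
        (fun acc p => if p.2 = maxA then acc ++ [p.1] else acc) []) ↔
        x ∈ ((pvHeights f).items.filterMap
          (fun p => if p.2 = maxA then some p.1 else none)) := by
      intro x
      rw [hmemA, hmemB]
      constructor
      · rintro ⟨r, hr, hb, rfl⟩
        exact ⟨x, (mem_keysB_iff_root f hac x).mpr hr, by rw [← HA_eq_HB f hnd hac x hr]; exact hb, rfl⟩
      · rintro ⟨k, hk, hb, rfl⟩
        have hk' := (mem_keysB_iff_root f hac x).mp hk
        exact ⟨x, hk', by rw [HA_eq_HB f hnd hac x hk']; exact hb, rfl⟩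
    -- ties of A nonempty: the max is attained
    have htAne : ((pvRootsDict f).items.foldl
        (fun acc p => if p.2 = maxA then acc ++ [p.1] else acc) []) ≠ [] := by
      obtain ⟨v, hv⟩ : ∃ m, PySem.List.max? (pvRootsDict f).values (fun x => x) = some m := by
        obtain ⟨a, s, hs⟩ := List.exists_cons_of_ne_nil hvAne
        rw [hs, PySem.List.max?_id_cons]; exact ⟨_, rfl⟩
      have hvA : maxA = v := by rw [hmaxA, hv]; rfl
      have hvm := PySem.List.max?_mem hv
      rw [hvaluesA] at hvm
      obtain ⟨r, hr, hrv⟩ := List.mem_map.mp hvm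
      intro hempty
      have := (hmemA r).mpr ⟨r, hr, by rw [hrv, hvA], rfl⟩
      rw [hempty] at this
      exact absurd this (by simp)
    rw [min_ext hmemAB htAne]

-- ===== VERDICT (by name: the statement is the Claim_ definition above) =====
theorem tallest_tree_root_spec : Claim_equal_tallest_tree_root := by
  intro forest _ hpre
  exact main_equiv forest hpre.1 hpre.2
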